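-- pv_equiv track=rewrite | github.com/wazeka0412/payhome-next | scripts/convert-latest-md-to-docs.py | _split_bold
-- ===== SOURCE A (Python) =====
-- def _split_bold(text: str) -> list[tuple[str, bool]]:
--     """Very small ``**bold**`` splitter."""
--     parts: list[tuple[str, bool]] = []
--     buf = ""
--     i = 0
--     while i < len(text):
--         if text[i : i + 2] == "**":
--             if buf:
--                 parts.append((buf, False))
--                 buf = ""
--             j = text.find("**", i + 2)
--             if j == -1:
--                 buf += text[i:]
--                 break
--             parts.append((text[i + 2 : j], True))
--             i = j + 2
--         else:
--             buf += text[i]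
--             i += 1
--     if buf:
--         parts.append((buf, False))
--     return parts
-- ===== SOURCE B (Python) =====
-- def _split_bold(text: str) -> list[tuple[str, bool]]:
--     """Very small ``**bold**`` splitter (find-based, no char buffer)."""
--     parts: list[tuple[str, bool]] = []
--     i = 0
--     n = len(text)
--     while i < n:
--         j = text.find("**", i)
--         if j == -1:
--             parts.append((text[i:], False))
--             break
--         if j > i:
--             parts.append((text[i:j], False))
--         k = text.find("**", j + 2)
--         if k == -1:
--             parts.append((text[j:], False))
--             break
--         parts.append((text[j + 2:k], True))
--         i = k + 2
--     return parts
-- ===== Notes on version B (the rewrite author's own statement) =====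
-- stated objective: faster
-- what changed: Replaced A's char-by-char scan with a string buffer and flush-on-marker state machine by a loop that does two substring-find calls per iteration and slices whole segments out of the text, appending each segment directly.
import Mathlib
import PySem

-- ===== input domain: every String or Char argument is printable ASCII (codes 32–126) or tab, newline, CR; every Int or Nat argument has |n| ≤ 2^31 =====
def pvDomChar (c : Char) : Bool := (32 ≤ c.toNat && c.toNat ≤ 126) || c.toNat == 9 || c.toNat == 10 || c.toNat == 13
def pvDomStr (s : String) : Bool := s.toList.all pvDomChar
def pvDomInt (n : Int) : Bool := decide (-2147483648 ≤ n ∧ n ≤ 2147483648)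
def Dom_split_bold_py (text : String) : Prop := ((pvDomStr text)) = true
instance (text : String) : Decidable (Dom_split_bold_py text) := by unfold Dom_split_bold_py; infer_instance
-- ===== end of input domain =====

-- B replaces A's char-by-char buffer accumulation with a find/find loop that slices
-- whole segments out of the text at once (objective: faster; avoids per-char buffer concatenation).

-- shared helper: text.find("**", i) on the remaining characters; returns the
-- characters before the first "**" and the characters after it (exact hand port).
def findBold : List Char → Option (List Char × List Char)
  | c1 :: c2 :: rest =>
      if c1 = '*' && c2 = '*' then some ([], rest)
      else (findBold (c2 :: rest)).map (fun pt => (c1 :: pt.1, pt.2))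
  | _ => none

theorem findBold_length : ∀ (cs pre tail : List Char),
    findBold cs = some (pre, tail) → pre.length + 2 + tail.length = cs.length := by
  intro cs
  induction cs with
  | nil => intro pre tail h; simp [findBold] at h
  | cons c1 rest ih =>
    intro pre tail h
    cases rest with
    | nil => simp [findBold] at h
    | cons c2 rest2 =>
      simp only [findBold] at h
      split at h
      · injection h with h'; injection h' with h1 h2; subst h1; subst h2; simp; omega
      · cases hf : findBold (c2 :: rest2) with
        | none => rw [hf] at h; simp at h
        | some pt =>
          rw [hf] at h; simp at h
          obtain ⟨h1, h2⟩ := h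
          have := ih pt.1 pt.2 (by rw [hf])
          subst h1; subst h2
          simp at this ⊢; omega


-- ===== PORT A =====
-- A's while loop: buf accumulates chars one by one; on "**" flush buf, look for
-- the closing "**"; if none, the rest (including the "**") goes into buf; at the
-- end flush buf.  flushA buf = "append (buf, False) if buf else nothing".
def flushA (buf : List Char) : List (List Char × Bool) :=
  if buf = [] then [] else [(buf, false)]

def aLoop : List Char → List Char → List (List Char × Bool) → List (List Char × Bool)
  | c1 :: c2 :: rest, buf, parts =>
      if c1 = '*' && c2 = '*' then
        let parts' := parts ++ flushA buf
        match h : findBold rest with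
        | none => parts' ++ flushA (c1 :: c2 :: rest)
        | some (mid, after) => aLoop after [] (parts' ++ [(mid, true)])
      else aLoop (c2 :: rest) (buf ++ [c1]) parts
  | [c], buf, parts => parts ++ flushA (buf ++ [c])
  | [], buf, parts => parts ++ flushA buf
termination_by cs _ _ => cs.length
decreasing_by
  · have := findBold_length _ _ _ h; simp; omega
  · simp

def split_bold_py (text : String) : List (String × Bool) :=
  (aLoop text.toList [] []).map (fun sb => (String.mk sb.1, sb.2))

-- ===== PORT B =====
-- B: while text remains, find the next "**"; if none the rest is one plain
-- segment; emit the (possibly empty) run before it, find the closing "**";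
-- if none the tail from the opening "**" is one plain segment, else emit the
-- bold segment and continue after the closing marker.
def bLoop (cs : List Char) : List (List Char × Bool) :=
  if cs = [] then []
  else
    match h0 : findBold cs with
    | none => [(cs, false)]
    | some (pre, tail) =>
        (if pre = [] then [] else [(pre, false)]) ++
        match h : findBold tail with
        | none => [('*' :: '*' :: tail, false)]
        | some (mid, after) => (mid, true) :: bLoop after
termination_by cs.length
decreasing_by
  have h1 := findBold_length _ _ _ h0
  have h2 := findBold_length _ _ _ h
  simp; omega

def split_bold_py_alt (text : String) : List (String × Bool) :=
  (bLoop text.toList).map (fun sb => (String.mk sb.1, sb.2))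

-- ===== PRECONDITION & SPEC =====
def Spec_split_bold_py (text : String) (out : List (String × Bool)) : Prop := out = split_bold_py_alt text
instance (text : String) (out : List (String × Bool)) : Decidable (Spec_split_bold_py text out) := by unfold Spec_split_bold_py; infer_instance

-- ===== CLAIM (what is proved, stated in full; the proofs are below) =====
def Claim_equal_split_bold_py : Prop := ∀ (text : String), Dom_split_bold_py text → Spec_split_bold_py text (split_bold_py text)

-- ===== LEMMAS AND PROOFS =====

-- "B with a pending plain prefix buf": non-recursive bridge between A and B.
def bPend (buf cs : List Char) : List (List Char × Bool) :=
  match findBold cs with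
  | none => flushA (buf ++ cs)
  | some (pre, tail) =>
      flushA (buf ++ pre) ++
      match findBold tail with
      | none => [('*' :: '*' :: tail, false)]
      | some (mid, after) => (mid, true) :: bLoop after

theorem bPend_nil (cs : List Char) : bPend [] cs = bLoop cs := by
  conv_rhs => rw [bLoop]
  by_cases hcs : cs = []
  · subst hcs; simp [bPend, findBold, flushA]
  · simp only [hcs, if_false]
    cases hf : findBold cs with
    | none => simp [bPend, hf, flushA, hcs]
    | some pt =>
      obtain ⟨pre, tail⟩ := pt
      simp only [bPend, hf]
      by_cases hp : pre = [] <;>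
        · simp only [flushA, hp, if_true, if_false, List.nil_append]
          congr 1
          split <;> split <;> simp_all

theorem bPend_shift (c : Char) (c2 : Char) (rest buf : List Char)
    (h : ¬(c = '*' && c2 = '*') = true) :
    bPend buf (c :: c2 :: rest) = bPend (buf ++ [c]) (c2 :: rest) := by
  have hf : findBold (c :: c2 :: rest)
      = (findBold (c2 :: rest)).map (fun pt => (c :: pt.1, pt.2)) := by
    simp only [findBold]
    rw [if_neg h]
  cases hg : findBold (c2 :: rest) with
  | none => simp [bPend, hf, hg, flushA]
  | some pt =>
    obtain ⟨pre, tail⟩ := pt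
    simp [bPend, hf, hg, flushA]

theorem aLoop_eq_bPend : ∀ (n : ℕ) (cs buf parts : _),
    cs.length ≤ n → aLoop cs buf parts = parts ++ bPend buf cs := by
  intro n
  induction n with
  | zero =>
    intro cs buf parts hn
    have : cs = [] := by cases cs <;> simp_all
    subst this
    simp [aLoop, bPend, findBold, flushA]
  | succ n ih =>
    intro cs buf parts hn
    match cs with
    | [] => simp [aLoop, bPend, findBold, flushA]
    | [c] => simp [aLoop, bPend, findBold, flushA]
    | c1 :: c2 :: rest =>
      by_cases hstar : (c1 = '*' && c2 = '*') = true
      · obtain ⟨h1, h2⟩ := by simpa using hstar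
        subst h1; subst h2
        rw [aLoop, if_pos hstar]
        have hf0 : findBold ('*' :: '*' :: rest) = some ([], rest) := by
          simp [findBold]
        split
        · rename_i heq
          simp [bPend, hf0, heq, flushA, List.append_assoc]
        · rename_i mid after heq
          have hlen := findBold_length _ _ _ heq
          rw [ih after [] _ (by simp at hn ⊢; omega), bPend_nil]
          simp [bPend, hf0, heq, List.append_assoc]
      · rw [aLoop]
        simp only [if_neg hstar]
        rw [ih (c2 :: rest) (buf ++ [c1]) parts (by simp at hn ⊢; omega)]
        rw [bPend_shift c1 c2 rest buf hstar]

theorem aLoop_eq_bLoop (cs : List Char) : aLoop cs [] [] = bLoop cs := by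
  rw [aLoop_eq_bPend cs.length cs [] [] (le_refl _), bPend_nil]
  simp

-- ===== VERDICT (by name: the statement is the Claim_ definition above) =====
theorem split_bold_py_spec : Claim_equal_split_bold_py := by
  intro text _
  unfold Spec_split_bold_py split_bold_py split_bold_py_alt
  rw [aLoop_eq_bLoop]
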